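-- pv_equiv track=rewrite | github.com/james5635/GeekForGeek-Data-Structure-and-Algorithm | hashing/hard/maximum_array_two_arrays/solution.py | max_array_from_two_arrays
-- ===== SOURCE A (Python) =====
-- from typing import List
--
-- def max_array_from_two_arrays(A: List[int], B: List[int]) -> List[int]:
--     """
--     Create maximum lexicographical array preserving relative order.
--
--     Args:
--         A: First array
--         B: Second array
--
--     Returns:
--         Maximum lexicographical merged array
--     """
--     n = len(A)
--     m = len(B)
--
--     # Create monotonic decreasing sequences
--     def monotonic_decreasing(arr: List[int]) -> List[int]:
--         """Find next greater or equal element indices."""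
--         n = len(arr)
--         result = [-1] * n
--         stack = []
--
--         for i in range(n):
--             while stack and arr[stack[-1]] < arr[i]:
--                 idx = stack.pop()
--                 result[idx] = i
--             stack.append(i)
--
--         return result
--
--     # Get next greater element positions
--     next_greater_A = monotonic_decreasing(A)
--     next_greater_B = monotonic_decreasing(B)
--
--     result = []
--     i, j = 0, 0
--
--     while i < n and j < m:
--         if A[i] > B[j]:
--             result.append(A[i])
--             i += 1
--         elif A[i] < B[j]:
--             result.append(B[j])
--             j += 1
--         else:
--             # Equal elements - need to look ahead
--             # Choose the one that leads to better sequence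
--             temp_i, temp_j = i, j
--
--             while temp_i < n and temp_j < m and A[temp_i] == B[temp_j]:
--                 temp_i += 1
--                 temp_j += 1
--
--             # Determine which sequence is better
--             if temp_j >= m or (temp_i < n and A[temp_i] > B[temp_j]):
--                 result.append(A[i])
--                 i += 1
--             else:
--                 result.append(B[j])
--                 j += 1
--
--     # Add remaining elements
--     while i < n:
--         result.append(A[i])
--         i += 1
--
--     while j < m:
--         result.append(B[j])
--         j += 1
--
--     return result
-- ===== SOURCE B (Python) =====
-- from typing import List
--
-- def max_array_from_two_arrays(A: List[int], B: List[int]) -> List[int]: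
--     """Greedy merge: always take the head of the lexicographically larger suffix."""
--     res = []
--     i, j, n, m = 0, 0, len(A), len(B)
--     while i < n and j < m:
--         if A[i:] >= B[j:]:
--             res.append(A[i])
--             i += 1
--         else:
--             res.append(B[j])
--             j += 1
--     return res + A[i:] + B[j:]
-- ===== Notes on version B (the rewrite author's own statement) =====
-- stated objective: simpler
-- what changed: B drops A's dead monotonic-stack precomputation and replaces the three-way branch with hand-written look-ahead by a single greedy step that takes the head of the lexicographically larger remaining suffix (Python list comparison), appending both leftovers at the end.
import Mathlib
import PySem

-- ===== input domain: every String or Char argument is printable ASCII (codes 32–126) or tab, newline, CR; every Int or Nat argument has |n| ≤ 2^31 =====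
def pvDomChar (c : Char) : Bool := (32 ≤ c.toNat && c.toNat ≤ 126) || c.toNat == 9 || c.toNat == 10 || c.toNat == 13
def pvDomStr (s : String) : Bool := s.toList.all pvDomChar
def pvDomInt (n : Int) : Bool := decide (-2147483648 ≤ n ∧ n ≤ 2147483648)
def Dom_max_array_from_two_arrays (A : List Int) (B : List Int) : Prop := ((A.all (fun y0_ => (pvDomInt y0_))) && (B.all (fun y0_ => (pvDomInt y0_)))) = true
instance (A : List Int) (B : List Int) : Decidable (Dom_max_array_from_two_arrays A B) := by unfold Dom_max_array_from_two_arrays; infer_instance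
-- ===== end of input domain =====

-- B replaces A's dead monotonic-stack code and hand-written equal-run look-ahead by one
-- greedy step on the lexicographically larger remaining suffix; return value only, simpler.

-- ===== PORT A =====

-- Python's inner `while stack and arr[stack[-1]] < arr[i]` loop (stack is cons-at-top);
-- indices in the stack are always in range, `getD 0` is exact here.
def mdPop (arr : List Int) (i : Nat) : List Nat → List Int → List Nat × List Int
  | [], result => ([], result)
  | idx :: rest, result =>
      if arr.getD idx 0 < arr.getD i 0 then mdPop arr i rest (result.set idx (Int.ofNat i))
      else (idx :: rest, result)

-- `monotonic_decreasing` helper of A (its value is never used by A, kept for faithfulness)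
def monotonicDecreasing (arr : List Int) : List Int :=
  ((List.range arr.length).foldl
    (fun st i =>
      let st' := mdPop arr i st.1 st.2
      (i :: st'.1, st'.2))
    ([], List.replicate arr.length (-1))).2

-- the equal-elements look-ahead: `while temp_i < n and temp_j < m and A[temp_i] == B[temp_j]`
def lookA (A B : List Int) (ti tj : Nat) : Nat × Nat :=
  if h : ti < A.length ∧ tj < B.length ∧ A.getD ti 0 = B.getD tj 0 then
    lookA A B (ti + 1) (tj + 1)
  else (ti, tj)
termination_by A.length - ti
decreasing_by omega

-- the main merge loop of A; the two trailing drain loops are the `++ drop` tail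
def mergeA (A B : List Int) (i j : Nat) : List Int :=
  if h : i < A.length ∧ j < B.length then
    if B.getD j 0 < A.getD i 0 then
      A.getD i 0 :: mergeA A B (i + 1) j
    else if A.getD i 0 < B.getD j 0 then
      B.getD j 0 :: mergeA A B i (j + 1)
    else
      let p := lookA A B i j
      if B.length ≤ p.2 ∨ (p.1 < A.length ∧ B.getD p.2 0 < A.getD p.1 0) then
        A.getD i 0 :: mergeA A B (i + 1) j
      else
        B.getD j 0 :: mergeA A B i (j + 1)
  else
    A.drop i ++ B.drop j
termination_by (A.length - i) + (B.length - j)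
decreasing_by all_goals omega

def max_array_from_two_arrays (A : List Int) (B : List Int) : List Int :=
  let _next_greater_A := monotonicDecreasing A   -- computed and unused, as in A
  let _next_greater_B := monotonicDecreasing B
  mergeA A B 0 0

-- ===== PORT B =====

-- exact port of Python's list `>=` (lexicographic, shorter prefix is smaller)
def pyListGe : List Int → List Int → Bool
  | _, [] => true
  | [], _ :: _ => false
  | x :: xs, y :: ys => if y < x then true else if x < y then false else pyListGe xs ys

-- Source B's single while loop; `res + A[i:] + B[j:]` is the terminal `++`
def mergeB (A B : List Int) (i j : Nat) : List Int :=
  if h : i < A.length ∧ j < B.length then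
    if pyListGe (A.drop i) (B.drop j) then
      A.getD i 0 :: mergeB A B (i + 1) j
    else
      B.getD j 0 :: mergeB A B i (j + 1)
  else
    A.drop i ++ B.drop j
termination_by (A.length - i) + (B.length - j)
decreasing_by all_goals omega

def max_array_from_two_arrays_alt (A : List Int) (B : List Int) : List Int :=
  mergeB A B 0 0

-- ===== PRECONDITION & SPEC =====
def Spec_max_array_from_two_arrays (A : List Int) (B : List Int) (out : List Int) : Prop := out = max_array_from_two_arrays_alt A B
instance (A : List Int) (B : List Int) (out : List Int) : Decidable (Spec_max_array_from_two_arrays A B out) := by unfold Spec_max_array_from_two_arrays; infer_instance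

-- ===== CLAIM (what is proved, stated in full; the proofs are below) =====
def Claim_equal_max_array_from_two_arrays : Prop := ∀ (A : List Int) (B : List Int), Dom_max_array_from_two_arrays A B → Spec_max_array_from_two_arrays A B (max_array_from_two_arrays A B)

-- ===== LEMMAS AND PROOFS =====

-- A's look-ahead decision is exactly Python's `A[i:] >= B[j:]`
theorem lookA_pyListGe (A B : List Int) (ti tj : Nat) (hti : ti ≤ A.length) (htj : tj ≤ B.length) :
    pyListGe (A.drop ti) (B.drop tj) =
      decide (B.length ≤ (lookA A B ti tj).2 ∨
        ((lookA A B ti tj).1 < A.length ∧ B.getD (lookA A B ti tj).2 0 < A.getD (lookA A B ti tj).1 0)) := by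
  fun_induction lookA A B ti tj with
  | case1 ti tj h ih =>
      obtain ⟨h1, h2, h3⟩ := h
      rw [List.drop_eq_getElem_cons h1, List.drop_eq_getElem_cons h2]
      rw [show pyListGe (A[ti] :: A.drop (ti+1)) (B[tj] :: B.drop (tj+1)) =
            (if B[tj] < A[ti] then true else if A[ti] < B[tj] then false else pyListGe (A.drop (ti+1)) (B.drop (tj+1))) from rfl]
      have hA : A.getD ti 0 = A[ti] := List.getD_eq_getElem A 0 h1
      have hB : B.getD tj 0 = B[tj] := List.getD_eq_getElem B 0 h2
      rw [hA, hB] at h3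
      simp [h3, ih (by omega) (by omega)]
  | case2 ti tj h =>
      by_cases hm : B.length ≤ tj
      · have hd : B.drop tj = [] := List.drop_eq_nil_of_le hm
        rw [hd]
        have hge : pyListGe (A.drop ti) [] = true := by cases A.drop ti <;> rfl
        rw [hge]; symm; rw [decide_eq_true_iff]; left; exact hm
      · have hm' : tj < B.length := lt_of_not_ge hm
        rw [List.drop_eq_getElem_cons hm']
        by_cases hn : A.length ≤ ti
        · rw [List.drop_eq_nil_of_le hn]
          symm; rw [show pyListGe [] (B[tj] :: B.drop (tj+1)) = false from rfl, decide_eq_false_iff_not]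
          rintro (h1 | ⟨h2, -⟩) <;> omega
        · have hn' : ti < A.length := lt_of_not_ge hn
          rw [List.drop_eq_getElem_cons hn']
          have hA : A.getD ti 0 = A[ti] := List.getD_eq_getElem A 0 hn'
          have hB : B.getD tj 0 = B[tj] := List.getD_eq_getElem B 0 hm'
          have hne : A[ti] ≠ B[tj] := fun he => h ⟨hn', hm', by rw [hA, hB, he]⟩
          rw [show pyListGe (A[ti] :: A.drop (ti+1)) (B[tj] :: B.drop (tj+1)) =
                (if B[tj] < A[ti] then true else if A[ti] < B[tj] then false
                 else pyListGe (A.drop (ti+1)) (B.drop (tj+1))) from rfl]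
          rcases lt_or_gt_of_ne hne with hlt | hgt
          · rw [if_neg (not_lt_of_gt hlt), if_pos hlt]
            symm; rw [decide_eq_false_iff_not]
            rintro (h1 | ⟨-, h2⟩)
            · omega
            · rw [hA, hB] at h2; omega
          · rw [if_pos hgt]
            symm; rw [decide_eq_true_iff]
            exact Or.inr ⟨hn', by rw [hA, hB]; exact hgt⟩

theorem mergeA_eq_mergeB (A B : List Int) (i j : Nat) (hi : i ≤ A.length) (hj : j ≤ B.length) :
    mergeA A B i j = mergeB A B i j := by
  fun_induction mergeA A B i j with
  | case1 i j h h1 ih =>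
      have hge : pyListGe (A.drop i) (B.drop j) = true := by
        rw [List.drop_eq_getElem_cons h.1, List.drop_eq_getElem_cons h.2]
        rw [show pyListGe (A[i] :: A.drop (i+1)) (B[j] :: B.drop (j+1)) =
              (if B[j] < A[i] then true else if A[i] < B[j] then false
               else pyListGe (A.drop (i+1)) (B.drop (j+1))) from rfl]
        rw [List.getD_eq_getElem A 0 h.1, List.getD_eq_getElem B 0 h.2] at h1
        rw [if_pos h1]
      rw [mergeB, dif_pos h, if_pos hge, ih (by omega) hj]
  | case2 i j h h1 h2 ih =>
      have hge : pyListGe (A.drop i) (B.drop j) = false := by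
        rw [List.drop_eq_getElem_cons h.1, List.drop_eq_getElem_cons h.2]
        rw [show pyListGe (A[i] :: A.drop (i+1)) (B[j] :: B.drop (j+1)) =
              (if B[j] < A[i] then true else if A[i] < B[j] then false
               else pyListGe (A.drop (i+1)) (B.drop (j+1))) from rfl]
        rw [List.getD_eq_getElem A 0 h.1, List.getD_eq_getElem B 0 h.2] at h1 h2
        rw [if_neg h1, if_pos h2]
      rw [mergeB, dif_pos h, hge, if_neg (by simp), ih hi (by omega)]
  | case3 i j h h1 h2 p hp ih =>
      have hge : pyListGe (A.drop i) (B.drop j) = true := by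
        rw [lookA_pyListGe A B i j hi hj, decide_eq_true_iff]; exact hp
      rw [mergeB, dif_pos h, if_pos hge, ih (by omega) hj]
  | case4 i j h h1 h2 p hp ih =>
      have hge : pyListGe (A.drop i) (B.drop j) = false := by
        rw [lookA_pyListGe A B i j hi hj, decide_eq_false_iff_not]; exact hp
      rw [mergeB, dif_pos h, hge, if_neg (by simp), ih hi (by omega)]
  | case5 i j h =>
      rw [mergeB, dif_neg h]

-- ===== VERDICT (by name: the statement is the Claim_ definition above) =====
theorem max_array_from_two_arrays_spec : Claim_equal_max_array_from_two_arrays := by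
  intro A B _
  unfold Spec_max_array_from_two_arrays max_array_from_two_arrays max_array_from_two_arrays_alt
  exact mergeA_eq_mergeB A B 0 0 (Nat.zero_le _) (Nat.zero_le _)
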